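-- pv_equiv track=rewrite | github.com/NVisscher/Langtech | s2576597/learnparse.py | get_nouns_from_best_options
-- ===== SOURCE A (Python) =====
-- def skip(word):
--   badwords = ['will', 'are', 'do', 'does', 'what', 'is', 'who', 'whom', 'why', 'can', "'s", 'was', 'did', 'get', 'give', 'have', 'has', 'there', 'how', 'also', 'be', 'list']
--   if word.lower() in badwords:
--     return True
--   return False
--
-- def get_nouns_from_best_options(proporents, bestoptions):
--   ret = []
--   idx = bestoptions.index(max(bestoptions))
--   while not (bestoptions[idx] == 0):
--     if idx > len(proporents)-1:
--       break
--     bestoptions[idx] = 0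
--     if not skip(proporents[idx]):
--       ret.append(proporents[idx])
--     idx = bestoptions.index(max(bestoptions))
--   return ret
-- ===== SOURCE B (Python) =====
-- # B: sort positive-score indices once (score desc, position asc) and scan; faster than A s repeated max/index rescans. Unlike A it does not mutate bestoptions: equivalence is about the return value only.
-- BADWORDS = ['will', 'are', 'do', 'does', 'what', 'is', 'who', 'whom', 'why', 'can', "'s", 'was', 'did', 'get', 'give', 'have', 'has', 'there', 'how', 'also', 'be', 'list']
--
-- def get_nouns_from_best_options(proporents, bestoptions):
--   # indices with a strictly positive score, best score first, ties by position
--   order = sorted((i for i, v in enumerate(bestoptions) if v > 0),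
--                  key=lambda i: (-bestoptions[i], i))
--   ret = []
--   for i in order:
--     if i >= len(proporents):
--       break
--     w = proporents[i]
--     if w.lower() not in BADWORDS:
--       ret.append(w)
--   return ret
-- ===== Notes on version B (the rewrite author's own statement) =====
-- stated objective: faster
-- what changed: B replaces A's repeated max()+index() rescans with destructive zeroing by one sort of the positive-score indices (score descending, position ascending) followed by a single scan; B does not mutate bestoptions (return-value equivalence only).
-- intended difference: On inputs whose scores are all negative and where the first highest-scoring index lies inside proporents at a non-stopword word, A returns that single negative-scored noun (its 0-sentinel only appears after one iteration) while B returns [], the intended result since only positively scored options should be collected. — e.g. on get_nouns_from_best_options(["cat"], [-1]): A returns ["cat"], B returns []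
import Mathlib
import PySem

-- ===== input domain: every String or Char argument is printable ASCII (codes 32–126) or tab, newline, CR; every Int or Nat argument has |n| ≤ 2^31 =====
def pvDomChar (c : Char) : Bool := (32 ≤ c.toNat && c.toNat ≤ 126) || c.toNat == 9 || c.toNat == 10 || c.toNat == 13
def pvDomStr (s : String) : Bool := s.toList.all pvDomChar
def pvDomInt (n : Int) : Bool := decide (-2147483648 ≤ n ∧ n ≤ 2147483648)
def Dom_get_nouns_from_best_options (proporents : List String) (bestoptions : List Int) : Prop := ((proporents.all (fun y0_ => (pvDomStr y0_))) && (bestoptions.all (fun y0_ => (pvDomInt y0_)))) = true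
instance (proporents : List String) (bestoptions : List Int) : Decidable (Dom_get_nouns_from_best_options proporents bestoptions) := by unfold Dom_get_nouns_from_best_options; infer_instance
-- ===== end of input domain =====

-- B sorts the positive-score indices once (score descending, position ascending) and scans them,
-- instead of A's repeated max()+index() rescans with destructive zeroing; A mutates bestoptions
-- in place, B does not — the equivalence proved here is about the return value only.

-- ===== PORT A =====
def pvBadwords : List String := ["will", "are", "do", "does", "what", "is", "who", "whom", "why", "can", "'s", "was", "did", "get", "give", "have", "has", "there", "how", "also", "be", "list"]

def pvSkip (word : String) : Bool :=
  if pvBadwords.contains (PySem.Str.lower word) then true else false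

-- A's while loop; the mutated bestoptions is threaded as state, fuel = length+1 never runs out
-- (each iteration zeroes a nonzero entry).
def pvALoop (prop : List String) : Nat → List Int → List String → List String
  | 0, _, ret => ret
  | Nat.succ fuel, best, ret =>
    match PySem.List.max? best (fun x => x) with
    | none => ret
    | some m =>
      match PySem.List.index? best m with
      | none => ret
      | some idx =>
        match PySem.List.pyGet? best (idx : Int) with
        | none => ret
        | some v =>
          if v == 0 then ret
          else if ((idx : Int) > (prop.length : Int) - 1) then ret
          else
            match PySem.List.pyGet? prop (idx : Int) with
            | none => ret
            | some w =>
              pvALoop prop fuel (best.set idx 0) (if ¬ pvSkip w then ret ++ [w] else ret)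

def get_nouns_from_best_options (proporents : List String) (bestoptions : List Int) : List String :=
  pvALoop proporents (bestoptions.length + 1) bestoptions []

-- ===== PORT B =====
def pvBLoop (prop : List String) : List Int → List String → List String
  | [], ret => ret
  | i :: rest, ret =>
    if (prop.length : Int) ≤ i then ret
    else
      match PySem.List.pyGet? prop i with
      | none => ret
      | some w =>
        pvBLoop prop rest (if pvBadwords.contains (PySem.Str.lower w) then ret else ret ++ [w])

def get_nouns_from_best_options_alt (proporents : List String) (bestoptions : List Int) : List String :=
  let order := PySem.List.sorted2
      ((PySem.List.enumerate bestoptions).filterMap (fun p => if 0 < p.2 then some p.1 else none))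
      (fun i => -(PySem.List.pyGetD bestoptions i 0)) (fun i => i)
  pvBLoop proporents order []

-- ===== PRECONDITION & SPEC =====
-- Pre_ excludes only empty bestoptions, on which A raises ValueError (max() of an empty sequence).
def Pre_get_nouns_from_best_options (proporents : List String) (bestoptions : List Int) : Prop :=
  bestoptions ≠ []
instance (proporents : List String) (bestoptions : List Int) : Decidable (Pre_get_nouns_from_best_options proporents bestoptions) := by unfold Pre_get_nouns_from_best_options; infer_instance
def pvWitness_get_nouns_from_best_options : List String × List Int := (["cat"], [1])

-- On inputs whose scores are all negative and where the first highest-scoring index lies inside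
-- proporents at a non-stopword word, A returns that single negative-scored noun (its 0-sentinel
-- only appears after one iteration) while B returns [], the intended result since only positively
-- scored options should be collected.
def D_get_nouns_from_best_options (proporents : List String) (bestoptions : List Int) : Prop :=
  ∃ n ∈ List.range bestoptions.length,
    (∀ v ∈ bestoptions, v < 0) ∧
    n < proporents.length ∧
    (∀ j ∈ List.range bestoptions.length, bestoptions.getD j 0 ≤ bestoptions.getD n 0) ∧
    (∀ j ∈ List.range n, bestoptions.getD j 0 < bestoptions.getD n 0) ∧
    pvBadwords.contains (PySem.Str.lower (proporents.getD n "")) = false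
instance (proporents : List String) (bestoptions : List Int) : Decidable (D_get_nouns_from_best_options proporents bestoptions) := by unfold D_get_nouns_from_best_options; infer_instance

def Spec_get_nouns_from_best_options (proporents : List String) (bestoptions : List Int) (out : List String) : Prop := ¬ D_get_nouns_from_best_options proporents bestoptions → out = get_nouns_from_best_options_alt proporents bestoptions
instance (proporents : List String) (bestoptions : List Int) (out : List String) : Decidable (Spec_get_nouns_from_best_options proporents bestoptions out) := by unfold Spec_get_nouns_from_best_options; infer_instance

def pvDiffWitness_get_nouns_from_best_options : List String × List Int := (["cat"], [-1])
def pvDiffWitnessOut_get_nouns_from_best_options : (List String) × (List String) := (["cat"], [])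

-- ===== CLAIM (what is proved, stated in full; the proofs are below) =====
def Claim_unchanged_get_nouns_from_best_options : Prop := ∀ (proporents : List String) (bestoptions : List Int), Dom_get_nouns_from_best_options proporents bestoptions → Pre_get_nouns_from_best_options proporents bestoptions → Spec_get_nouns_from_best_options proporents bestoptions (get_nouns_from_best_options proporents bestoptions)
def Claim_changed_get_nouns_from_best_options : Prop := Dom_get_nouns_from_best_options (pvDiffWitness_get_nouns_from_best_options.1) (pvDiffWitness_get_nouns_from_best_options.2) ∧ Pre_get_nouns_from_best_options (pvDiffWitness_get_nouns_from_best_options.1) (pvDiffWitness_get_nouns_from_best_options.2) ∧ D_get_nouns_from_best_options (pvDiffWitness_get_nouns_from_best_options.1) (pvDiffWitness_get_nouns_from_best_options.2) ∧ get_nouns_from_best_options (pvDiffWitness_get_nouns_from_best_options.1) (pvDiffWitness_get_nouns_from_best_options.2) = pvDiffWitnessOut_get_nouns_from_best_options.1 ∧ get_nouns_from_best_options_alt (pvDiffWitness_get_nouns_from_best_options.1) (pvDiffWitness_get_nouns_from_best_options.2) = pvDiffWitnessOut_get_nouns_from_best_options.2 ∧ pvDiffWitnessOut_get_nouns_from_best_options.1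 ≠ pvDiffWitnessOut_get_nouns_from_best_options.2
def Claim_exact_get_nouns_from_best_options : Prop := ∀ (proporents : List String) (bestoptions : List Int), Dom_get_nouns_from_best_options proporents bestoptions → Pre_get_nouns_from_best_options proporents bestoptions → D_get_nouns_from_best_options proporents bestoptions → get_nouns_from_best_options proporents bestoptions ≠ get_nouns_from_best_options_alt proporents bestoptions

-- ===== LEMMAS AND PROOFS =====

def pvCands (best : List Int) (s : Int) : List Int :=
  (PySem.List.enumerate best s).filterMap (fun p => if 0 < p.2 then some p.1 else none)

lemma pvCands_nil (s : Int) : pvCands [] s = [] := by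
  unfold pvCands; rw [PySem.List.enumerate_nil]; rfl

lemma pvCands_cons (x : Int) (t : List Int) (s : Int) :
    pvCands (x :: t) s = if 0 < x then s :: pvCands t (s+1) else pvCands t (s+1) := by
  unfold pvCands; rw [PySem.List.enumerate_cons, List.filterMap_cons]
  split <;> simp_all

lemma pvMem_cands {t : List Int} {s j : Int} :
    j ∈ pvCands t s ↔ ∃ (k : Nat) (h : k < t.length), j = s + k ∧ 0 < t[k] := by
  induction t generalizing s j with
  | nil => simp [pvCands_nil]
  | cons x t ih =>
    rw [pvCands_cons]
    constructor
    · intro hj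
      by_cases hx : 0 < x
      · rw [if_pos hx] at hj
        rcases List.mem_cons.mp hj with h | h
        · exact ⟨0, by simp, by simpa using h, by simpa⟩
        · rcases ih.mp h with ⟨k, hk, hjk, hpos⟩
          exact ⟨k+1, by simpa using hk, by omega, by simpa using hpos⟩
      · rw [if_neg hx] at hj
        rcases ih.mp hj with ⟨k, hk, hjk, hpos⟩
        exact ⟨k+1, by simpa using hk, by omega, by simpa using hpos⟩
    · rintro ⟨k, hk, hjk, hpos⟩
      cases k with
      | zero =>
        simp only [List.getElem_cons_zero] at hpos
        rw [if_pos hpos]; simp only [hjk]; simp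
      | succ k =>
        have : j ∈ pvCands t (s+1) := ih.mpr ⟨k, by simpa using hk, by omega, by simpa using hpos⟩
        split <;> simp [this]

lemma pvCands_pairwise (t : List Int) (s : Int) : (pvCands t s).Pairwise (· < ·) := by
  induction t generalizing s with
  | nil => simp [pvCands_nil]
  | cons x t ih =>
    rw [pvCands_cons]
    split
    · refine List.Pairwise.cons ?_ (ih (s+1))
      intro j hj
      rcases pvMem_cands.mp hj with ⟨k, hk, hjk, _⟩
      omega
    · exact ih (s+1)

lemma pvCands_nil_of_nonpos {t : List Int} {s : Int} (h : ∀ v ∈ t, v ≤ 0) : pvCands t s = [] := by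
  rcases List.eq_nil_or_concat (pvCands t s) with hn | _
  · exact hn
  · by_contra
    rcases List.exists_mem_of_ne_nil _ (by assumption) with ⟨j, hj⟩
    rcases pvMem_cands.mp hj with ⟨k, hk, _, hpos⟩
    exact absurd (h _ (List.getElem_mem hk)) (by omega)

lemma pvCands_perm_set (t : List Int) (s : Int) (n : Nat) (h : n < t.length) (hp : 0 < t[n]) :
    (pvCands t s).Perm ((s + n) :: pvCands (t.set n 0) s) := by
  induction t generalizing s n with
  | nil => simp at h
  | cons x t ih =>
    cases n with
    | zero =>
      simp only [List.getElem_cons_zero] at hp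
      rw [List.set_cons_zero, pvCands_cons, pvCands_cons, if_pos hp, if_neg (by omega)]
      simp
    | succ n =>
      have hn : n < t.length := by simpa using h
      have hpn : 0 < t[n] := by simpa using hp
      rw [List.set_cons_succ, pvCands_cons, pvCands_cons]
      have hperm := ih (s+1) n hn hpn
      have harith : (s + 1 + (n:Int)) = s + ((n:Nat)+1 : Nat) := by push_cast; ring
      split
      · refine (hperm.cons s).trans ?_
        have hsw := List.Perm.swap (s + 1 + (n:Int)) s (pvCands (t.set n 0) (s+1))
        rw [← harith]
        exact hsw
      · rw [← harith]
        exact hperm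
def pvKey (best : List Int) (i : Int) : Int ×ₗ Int := toLex (-(PySem.List.pyGetD best i 0), i)

lemma pvCountP_set_lt {t : List Int} {n : Nat} (h : n < t.length) (hnz : t[n] ≠ 0) :
    (t.set n 0).countP (fun v => decide (v ≠ 0)) < t.countP (fun v => decide (v ≠ 0)) := by
  induction t generalizing n with
  | nil => simp at h
  | cons x t ih =>
    cases n with
    | zero =>
      simp only [List.getElem_cons_zero] at hnz
      rw [List.set_cons_zero]
      simp only [List.countP_cons]
      simp [hnz]
    | succ n =>
      have hn : n < t.length := by simpa using h
      have hnz' : t[n] ≠ 0 := by simpa using hnz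
      rw [List.set_cons_succ]
      simp only [List.countP_cons]
      have := ih hn hnz'
      omega

lemma pvKey_getD_nat (best : List Int) (k : Nat) (hk : k < best.length) :
    PySem.List.pyGetD best (k : Int) 0 = best[k] := by
  simp [PySem.List.pyGetD_natCast, List.getD_eq_getElem?_getD, hk]

lemma pvSorted_cons (best : List Int) (m : Int) (n : Nat)
    (hm : PySem.List.max? best (fun x => x) = some m) (hpos : 0 < m)
    (hidx : PySem.List.index? best m = some n) :
    PySem.List.sorted (pvCands best 0) (pvKey best)
      = (n : Int) :: PySem.List.sorted (pvCands (best.set n 0) 0) (pvKey (best.set n 0)) := by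
  obtain ⟨hn, hbn, hfirst⟩ := PySem.List.getElem_of_index?_eq_some hidx
  have hmax : ∀ y ∈ best, y ≤ m := by
    intro y hy; simpa using PySem.List.max?_isMax hm y hy
  -- membership in cands of the set list: index k ≠ n, value unchanged
  have hmem' : ∀ j ∈ pvCands (best.set n 0) 0, ∃ (k : Nat) (h : k < best.length),
      j = (k : Int) ∧ k ≠ n ∧ 0 < best[k] := by
    intro j hj
    rcases pvMem_cands.mp hj with ⟨k, hk, hjk, hpk⟩
    have hklen : k < best.length := by simpa using hk
    have hkn : k ≠ n := by
      intro he; subst he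
      rw [List.getElem_set_self (by simpa using hklen)] at hpk
      omega
    rw [List.getElem_set_ne (Ne.symm hkn)] at hpk
    exact ⟨k, hklen, by omega, hkn, hpk⟩
  have hkeq : ∀ j ∈ pvCands (best.set n 0) 0, pvKey (best.set n 0) j = pvKey best j := by
    intro j hj
    rcases hmem' j hj with ⟨k, hk, hjk, hkn, hpk⟩
    subst hjk
    unfold pvKey
    rw [pvKey_getD_nat (best.set n 0) k (by simpa using hk), pvKey_getD_nat best k hk,
        List.getElem_set_ne (Ne.symm hkn)]
  have hSmem : ∀ j ∈ PySem.List.sorted (pvCands (best.set n 0) 0) (pvKey (best.set n 0)),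
      j ∈ pvCands (best.set n 0) 0 :=
    fun j hj => (PySem.List.sorted_perm _ _ _).mem_iff.mp hj
  have hnodC : (pvCands (best.set n 0) 0).Nodup :=
    (pvCands_pairwise _ _).imp (fun h => ne_of_lt h)
  have hnodS : (PySem.List.sorted (pvCands (best.set n 0) 0) (pvKey (best.set n 0))).Nodup :=
    (PySem.List.sorted_perm _ _ _).nodup_iff.mpr hnodC
  have hinj : ∀ a b : Int, pvKey best a = pvKey best b → a = b := by
    intro a b hab
    unfold pvKey at hab
    have := congrArg (fun p => (ofLex p).2) hab
    simpa using this
  have hple : (PySem.List.sorted (pvCands (best.set n 0) 0) (pvKey (best.set n 0))).Pairwise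
      (fun a b => pvKey best a < pvKey best b) := by
    have h1 := PySem.List.sorted_pairwise (pvCands (best.set n 0) 0) (pvKey (best.set n 0))
    have h2 := h1.and hnodS
    refine h2.imp_of_mem ?_
    intro a b ha hb hab
    rw [hkeq a (hSmem a ha), hkeq b (hSmem b hb)] at hab
    exact lt_of_le_of_ne hab.1 (fun he => hab.2 (hinj _ _ he))
  have hhead : ∀ j ∈ PySem.List.sorted (pvCands (best.set n 0) 0) (pvKey (best.set n 0)),
      pvKey best (n : Int) < pvKey best j := by
    intro j hj
    rcases hmem' j (hSmem j hj) with ⟨k, hk, hjk, hkn, hpk⟩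
    subst hjk
    unfold pvKey
    rw [pvKey_getD_nat best n hn, pvKey_getD_nat best k hk, hbn]
    rw [Prod.Lex.toLex_lt_toLex]
    rcases lt_or_eq_of_le (hmax best[k] (List.getElem_mem hk)) with hlt | heq
    · left; omega
    · right
      constructor
      · omega
      · have : ¬ (k < n) := fun hkl => hfirst k hkl heq
        have : n < k := by omega
        simpa using (by exact_mod_cast this : ((n:Nat):Int) < ((k:Nat):Int))
  refine PySem.List.sorted_eq_of_perm_of_pairwise_lt _ _ _ ?_ ?_
  · have hpos' : 0 < best[n] := by rw [hbn]; exact hpos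
    have hp := pvCands_perm_set best 0 n hn hpos'
    rw [zero_add] at hp
    exact ((PySem.List.sorted_perm _ _ _).cons ((n:Nat) : Int)).trans hp.symm
  · exact List.pairwise_cons.mpr ⟨hhead, hple⟩


lemma pvSorted2_eq_sorted (best xs : List Int) :
    PySem.List.sorted2 xs (fun i => -(PySem.List.pyGetD best i 0)) (fun i => i)
      = PySem.List.sorted xs (pvKey best) := by
  have hcomp : (fun a b : Int => (decide (-(PySem.List.pyGetD best a 0) < -(PySem.List.pyGetD best b 0)) || (!decide (-(PySem.List.pyGetD best b 0) < -(PySem.List.pyGetD best a 0)) && decide (a < b))))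
      = fun a b : Int => decide (pvKey best a < pvKey best b) := by
    funext a b
    rw [Bool.eq_iff_iff]
    simp only [pvKey, Prod.Lex.toLex_lt_toLex, Bool.or_eq_true, Bool.and_eq_true, decide_eq_true_eq, Bool.not_eq_true', decide_eq_false_iff_not]
    omega
  rw [PySem.List.sorted_eq_foldl_insertBy]
  unfold PySem.List.sorted2
  simp only [Bool.false_eq_true, if_false, hcomp]

lemma pvGet_of_index {xs : List Int} {v : Int} {n : Nat} (h : PySem.List.index? xs v = some n) :
    PySem.List.pyGet? xs (n : Int) = some v := by
  obtain ⟨hn, hv, -⟩ := PySem.List.getElem_of_index?_eq_some h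
  rw [PySem.List.pyGet?_natCast, List.getElem?_eq_getElem hn, hv]

lemma pvAltEq (prop : List String) (best : List Int) :
    get_nouns_from_best_options_alt prop best
      = pvBLoop prop (PySem.List.sorted (pvCands best 0) (pvKey best)) [] := by
  show pvBLoop prop (PySem.List.sorted2 (pvCands best 0) (fun i => -(PySem.List.pyGetD best i 0)) (fun i => i)) [] = _
  rw [pvSorted2_eq_sorted]

lemma pvMain (prop : List String) : ∀ (fuel : Nat) (best : List Int) (ret : List String),
    best.countP (fun v => decide (v ≠ 0)) < fuel → (∃ v ∈ best, 0 ≤ v) →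
    pvALoop prop fuel best ret = pvBLoop prop (PySem.List.sorted (pvCands best 0) (pvKey best)) ret := by
  intro fuel
  induction fuel with
  | zero => intro best ret h _; omega
  | succ fuel ih =>
    intro best ret hcnt hex
    obtain ⟨v0, hv0mem, hv0⟩ := hex
    have hne : best ≠ [] := by rintro rfl; simp at hv0mem
    obtain ⟨m, hm⟩ : ∃ m, PySem.List.max? best (fun x => x) = some m := by
      cases hmx : PySem.List.max? best (fun x => x) with
      | none => exact absurd ((PySem.List.max?_eq_none_iff _ _).mp hmx) hne
      | some m => exact ⟨m, rfl⟩
    have hmax : ∀ y ∈ best, y ≤ m := fun y hy => by simpa using PySem.List.max?_isMax hm y hy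
    have hm0 : 0 ≤ m := le_trans hv0 (hmax _ hv0mem)
    obtain ⟨n, hidx⟩ : ∃ n, PySem.List.index? best m = some n := by
      have hs := (PySem.List.index?_isSome_iff best m).mpr (PySem.List.max?_mem hm)
      cases h : PySem.List.index? best m with
      | none => rw [h] at hs; simp at hs
      | some n => exact ⟨n, rfl⟩
    obtain ⟨hn, hbn, hfirst⟩ := PySem.List.getElem_of_index?_eq_some hidx
    have hget : PySem.List.pyGet? best ((n : Nat) : Int) = some m := pvGet_of_index hidx
    have hidxN := hidx
    simp only [PySem.List.index?_eq_idxOf?] at hidxN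
    have hgetN := hget
    rw [PySem.List.pyGet?_natCast] at hgetN
    by_cases hmz : m = 0
    · subst hmz
      have hcn : pvCands best 0 = [] := pvCands_nil_of_nonpos (fun v hv => hmax v hv)
      have hsn : PySem.List.sorted (pvCands best 0) (pvKey best) = [] := by
        rw [hcn]; exact (PySem.List.sorted_eq_nil_iff _ _ _).mpr rfl
      rw [hsn]
      simp [pvALoop, hm, hidxN, hgetN, pvBLoop]
    · have hpos : 0 < m := by omega
      rw [pvSorted_cons best m n hm hpos hidx]
      by_cases hr : prop.length ≤ n
      · simp [pvALoop, hm, hidxN, hgetN, hmz, hr, pvBLoop]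
      · have hnp : (n : Nat) < prop.length := by omega
        have hwN : prop[(n : Nat)]? = some (prop[(n : Nat)]) := List.getElem?_eq_getElem hnp
        have hacc : (if pvSkip (prop[(n : Nat)]) = false then ret ++ [prop[(n : Nat)]] else ret)
            = (if pvBadwords.contains (PySem.Str.lower (prop[(n : Nat)])) then ret else ret ++ [prop[(n : Nat)]]) := by
          simp only [pvSkip]
          split <;> simp_all
        have hcnt' : (best.set n 0).countP (fun v => decide (v ≠ 0)) < fuel := by
          have := pvCountP_set_lt hn (by rw [hbn]; exact hmz)
          omega
        have hex' : ∃ v ∈ best.set n 0, (0:Int) ≤ v := by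
          refine ⟨(best.set n 0)[n]'(by simpa using hn), List.getElem_mem _, ?_⟩
          rw [List.getElem_set_self]
        have hIH := ih (best.set n 0) (if pvBadwords.contains (PySem.Str.lower (prop[(n : Nat)])) then ret else ret ++ [prop[(n : Nat)]]) hcnt' hex'
        simpa [pvALoop, pvBLoop, hm, hidxN, hgetN, hmz, hr, hwN, hacc] using hIH

lemma pvALoop_allneg (prop : List String) (best : List Int) (m : Int) (n : Nat) (w : String)
    (fuel : Nat) (ret : List String)
    (hm : PySem.List.max? best (fun x => x) = some m) (hneg : m < 0)
    (hidx : PySem.List.index? best m = some n)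
    (hw : PySem.List.pyGet? prop (n : Int) = some w) :
    pvALoop prop (fuel + 2) best ret = (if ¬ pvSkip w then ret ++ [w] else ret) := by
  obtain ⟨hn, hbn, hfirst⟩ := PySem.List.getElem_of_index?_eq_some hidx
  have hmax : ∀ y ∈ best, y ≤ m := fun y hy => by simpa using PySem.List.max?_isMax hm y hy
  have hget : PySem.List.pyGet? best ((n : Nat) : Int) = some m := pvGet_of_index hidx
  have hnp : (n : Nat) < prop.length := by
    have h1 : prop[(n : Nat)]? = some w := by rw [← PySem.List.pyGet?_natCast]; exact hw
    exact (List.getElem?_eq_some_iff.mp h1).1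
  have hr : ¬ ((n : Nat) : Int) > (prop.length : Int) - 1 := by omega
  have hmz : m ≠ 0 := by omega
  -- after the first iteration the maximum is the freshly written 0
  have hmem0 : (0:Int) ∈ best.set n 0 := by
    refine List.mem_of_getElem (i := n) (h := by simpa using hn) ?_
    rw [List.getElem_set_self]
  have hle0 : ∀ y ∈ best.set n 0, y ≤ 0 := by
    intro y hy
    rcases List.mem_or_eq_of_mem_set hy with h | h
    · have := hmax y h; omega
    · omega
  obtain ⟨m2, hm2⟩ : ∃ m2, PySem.List.max? (best.set n 0) (fun x => x) = some m2 := by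
    cases hmx : PySem.List.max? (best.set n 0) (fun x => x) with
    | none =>
      exfalso
      have h0 : best.set n 0 = [] := (PySem.List.max?_eq_none_iff _ _).mp hmx
      have hlen := congrArg List.length h0
      simp only [List.length_set, List.length_nil] at hlen
      omega
    | some m2 => exact ⟨m2, rfl⟩
  have hm2z : m2 = 0 := by
    have h1 : m2 ≤ 0 := hle0 m2 (PySem.List.max?_mem hm2)
    have h2 : (0:Int) ≤ m2 := by simpa using PySem.List.max?_isMax hm2 0 hmem0
    omega
  subst hm2z
  obtain ⟨n2, hidx2⟩ : ∃ n2, PySem.List.index? (best.set n 0) 0 = some n2 := by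
    have hs := (PySem.List.index?_isSome_iff (best.set n 0) 0).mpr hmem0
    cases h : PySem.List.index? (best.set n 0) 0 with
    | none => rw [h] at hs; simp at hs
    | some n2 => exact ⟨n2, rfl⟩
  have hget2 : PySem.List.pyGet? (best.set n 0) ((n2 : Nat) : Int) = some 0 := pvGet_of_index hidx2
  have hidxN := hidx; simp only [PySem.List.index?_eq_idxOf?] at hidxN
  have hgetN := hget; rw [PySem.List.pyGet?_natCast] at hgetN
  have hidx2N := hidx2; simp only [PySem.List.index?_eq_idxOf?] at hidx2N
  have hget2N := hget2; rw [PySem.List.pyGet?_natCast] at hget2N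
  have hwN : prop[(n : Nat)]? = some w := by rw [← PySem.List.pyGet?_natCast]; exact hw
  have hrN : ¬ prop.length ≤ n := by omega
  show pvALoop prop (fuel + 1 + 1) best ret = _
  simp [pvALoop, hm, hidxN, hgetN, hmz, hrN, hwN, hm2, hidx2N, hget2N]

-- ===== VERDICT (by name: the statement is the Claim_ definition above) =====
theorem get_nouns_from_best_options_spec : Claim_unchanged_get_nouns_from_best_options := by
  intro prop best hdom hpre
  unfold Spec_get_nouns_from_best_options
  intro hnd
  rw [pvAltEq]
  unfold get_nouns_from_best_options
  obtain ⟨m, hm⟩ : ∃ m, PySem.List.max? best (fun x => x) = some m := by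
    cases hmx : PySem.List.max? best (fun x => x) with
    | none => exact absurd ((PySem.List.max?_eq_none_iff _ _).mp hmx) hpre
    | some m => exact ⟨m, rfl⟩
  by_cases hm0 : 0 ≤ m
  · exact pvMain prop (best.length + 1) best []
      (by have := List.countP_le_length (p := fun v : Int => decide (v ≠ 0)) (l := best); omega)
      ⟨m, PySem.List.max?_mem hm, hm0⟩
  · have hneg : m < 0 := by omega
    have hmz : m ≠ 0 := by omega
    have hmax : ∀ y ∈ best, y ≤ m := fun y hy => by simpa using PySem.List.max?_isMax hm y hy
    have hsn : PySem.List.sorted (pvCands best 0) (pvKey best) = [] := by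
      rw [pvCands_nil_of_nonpos (fun v hv => le_trans (hmax v hv) (by omega))]
      exact (PySem.List.sorted_eq_nil_iff _ _ _).mpr rfl
    rw [hsn]
    obtain ⟨n, hidx⟩ : ∃ n, PySem.List.index? best m = some n := by
      have hs := (PySem.List.index?_isSome_iff best m).mpr (PySem.List.max?_mem hm)
      cases h : PySem.List.index? best m with
      | none => rw [h] at hs; simp at hs
      | some n => exact ⟨n, rfl⟩
    obtain ⟨hn, hbn, hfirst⟩ := PySem.List.getElem_of_index?_eq_some hidx
    have hget : PySem.List.pyGet? best ((n : Nat) : Int) = some m := pvGet_of_index hidx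
    have hidxN := hidx; simp only [PySem.List.index?_eq_idxOf?] at hidxN
    have hgetN := hget; rw [PySem.List.pyGet?_natCast] at hgetN
    by_cases hr : prop.length ≤ n
    · simp [pvALoop, hm, hidxN, hgetN, hmz, hr, pvBLoop]
    · have hnp : n < prop.length := by omega
      have hw : PySem.List.pyGet? prop ((n : Nat) : Int) = some (prop[n]) := by
        rw [PySem.List.pyGet?_natCast, List.getElem?_eq_getElem hnp]
      obtain ⟨k, hk⟩ : ∃ k, best.length + 1 = k + 2 := by
        cases best with
        | nil => exact absurd rfl hpre
        | cons _ t => exact ⟨t.length, by simp⟩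
      rw [hk, pvALoop_allneg prop best m n (prop[n]) k [] hm hneg hidx hw]
      have hgd : ∀ (j : Nat) (hj : j < best.length), best.getD j 0 = best[j]'hj :=
        fun j hj => List.getD_eq_getElem best 0 hj
      have hcont : pvBadwords.contains (PySem.Str.lower (prop[n])) = true := by
        by_contra hc
        apply hnd
        refine ⟨n, List.mem_range.mpr hn, ?_, hnp, ?_, ?_, ?_⟩
        · intro v hv; have := hmax v hv; omega
        · intro j hj
          have hjl := List.mem_range.mp hj
          rw [hgd j hjl, hgd n hn, hbn]
          exact hmax _ (List.getElem_mem hjl)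
        · intro j hj
          have hjn := List.mem_range.mp hj
          have hjl : j < best.length := by omega
          rw [hgd j hjl, hgd n hn, hbn]
          have h1 := hmax _ (List.getElem_mem hjl)
          have h2 := hfirst j hjn
          omega
        · rw [List.getD_eq_getElem prop "" hnp]
          exact eq_false_of_ne_true hc
      simp at hcont
      simp [pvSkip, hcont, pvBLoop]

theorem get_nouns_from_best_options_changed : Claim_changed_get_nouns_from_best_options := by
  unfold Claim_changed_get_nouns_from_best_options; decide

theorem get_nouns_from_best_options_tight : Claim_exact_get_nouns_from_best_options := by
  intro prop best hdom hpre hD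
  obtain ⟨n, hnr, hallneg, hnp, hmaxD, hfirstD, hc⟩ := hD
  have hn : n < best.length := List.mem_range.mp hnr
  have hgd : ∀ (j : Nat) (hj : j < best.length), best.getD j 0 = best[j]'hj :=
    fun j hj => List.getD_eq_getElem best 0 hj
  obtain ⟨m, hm⟩ : ∃ m, PySem.List.max? best (fun x => x) = some m := by
    cases hmx : PySem.List.max? best (fun x => x) with
    | none => exact absurd ((PySem.List.max?_eq_none_iff _ _).mp hmx) hpre
    | some m => exact ⟨m, rfl⟩
  have hmax : ∀ y ∈ best, y ≤ m := fun y hy => by simpa using PySem.List.max?_isMax hm y hy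
  have hneg : m < 0 := hallneg m (PySem.List.max?_mem hm)
  have hmval : m = best[n] := by
    obtain ⟨j, hj, hjm⟩ := List.mem_iff_getElem.mp (PySem.List.max?_mem hm)
    have h1 := hmaxD j (List.mem_range.mpr hj)
    rw [hgd j hj, hgd n hn, hjm] at h1
    have h2 := hmax _ (List.getElem_mem hn)
    omega
  obtain ⟨n', hidx⟩ : ∃ n', PySem.List.index? best m = some n' := by
    have hs := (PySem.List.index?_isSome_iff best m).mpr (PySem.List.max?_mem hm)
    cases h : PySem.List.index? best m with
    | none => rw [h] at hs; simp at hs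
    | some n' => exact ⟨n', rfl⟩
  obtain ⟨hn', hbn', hfirst'⟩ := PySem.List.getElem_of_index?_eq_some hidx
  have hnn : n' = n := by
    by_contra hne
    rcases Nat.lt_or_ge n' n with hlt | hge
    · have h1 := hfirstD n' (List.mem_range.mpr hlt)
      rw [hgd n' hn', hgd n hn, ← hmval, hbn'] at h1
      omega
    · have hlt2 : n < n' := by omega
      exact hfirst' n hlt2 hmval.symm
  subst hnn
  have hw : PySem.List.pyGet? prop ((n' : Nat) : Int) = some (prop[n']) := by
    rw [PySem.List.pyGet?_natCast, List.getElem?_eq_getElem hnp]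
  obtain ⟨k, hk⟩ : ∃ k, best.length + 1 = k + 2 := by
    cases best with
    | nil => exact absurd rfl hpre
    | cons _ t => exact ⟨t.length, by simp⟩
  rw [pvAltEq]
  have hsn : PySem.List.sorted (pvCands best 0) (pvKey best) = [] := by
    rw [pvCands_nil_of_nonpos (fun v hv => le_trans (hmax v hv) (by omega))]
    exact (PySem.List.sorted_eq_nil_iff _ _ _).mpr rfl
  rw [hsn]
  unfold get_nouns_from_best_options
  rw [hk, pvALoop_allneg prop best m n' (prop[n']) k [] hm hneg hidx hw]
  have hcW : pvBadwords.contains (PySem.Str.lower (prop[n'])) = false := by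
    rw [List.getD_eq_getElem prop "" hnp] at hc; exact hc
  simp at hcW
  simp [pvSkip, hcW, pvBLoop]
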